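-- pv_equiv track=rewrite | github.com/paiml/depyler | examples/hard_interview_zigzag_string.py | zigzag_decode
-- ===== SOURCE A (Python) =====
-- def zigzag_decode(s: str, num_rows: int) -> str:
--     if num_rows <= 1:
--         return s
--     n: int = len(s)
--     cycle: int = 2 * (num_rows - 1)
--     result: list[str] = []
--     idx: int = 0
--     while idx < n:
--         result.append("")
--         idx = idx + 1
--     positions: list[int] = []
--     row: int = 0
--     while row < num_rows:
--         col: int = 0
--         while col < n:
--             first: int = col + row
--             if first < n:
--                 positions.append(first)
--             if row != 0 and row != num_rows - 1:
--                 second: int = col + cycle - row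
--                 if second < n:
--                     positions.append(second)
--             col = col + cycle
--         row = row + 1
--     m: int = 0
--     while m < n:
--         pos: int = positions[m]
--         result[pos] = s[m]
--         m = m + 1
--     out: str = ""
--     p: int = 0
--     while p < n:
--         out = out + result[p]
--         p = p + 1
--     return out
-- ===== SOURCE B (Python) =====
-- def zigzag_decode(s: str, num_rows: int) -> str:
--     if num_rows <= 1:
--         return s
--     n = len(s)
--     # simulate the zigzag walk over original positions, bucketing them by row
--     rows = [[] for _ in range(min(num_rows, n))]
--     r = 0
--     step = 1
--     for i in range(n):
--         rows[r].append(i)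
--         if r == 0:
--             step = 1
--         elif r == num_rows - 1:
--             step = -1
--         r = r + step
--     # s is the rows concatenated; hand its chars back to their original slots
--     out = [''] * n
--     m = 0
--     for row in rows:
--         for i in row:
--             out[i] = s[m]
--             m = m + 1
--     return ''.join(out)
-- ===== Notes on version B (the rewrite author's own statement) =====
-- stated objective: simpler
-- what changed: Replaces A's per-row nested column loops with closed-form jump arithmetic (col+row / col+cycle-row) by a single direction-bouncing walk over the original indices that buckets them into rows, then hands the characters of s back row by row.
import Mathlib
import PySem

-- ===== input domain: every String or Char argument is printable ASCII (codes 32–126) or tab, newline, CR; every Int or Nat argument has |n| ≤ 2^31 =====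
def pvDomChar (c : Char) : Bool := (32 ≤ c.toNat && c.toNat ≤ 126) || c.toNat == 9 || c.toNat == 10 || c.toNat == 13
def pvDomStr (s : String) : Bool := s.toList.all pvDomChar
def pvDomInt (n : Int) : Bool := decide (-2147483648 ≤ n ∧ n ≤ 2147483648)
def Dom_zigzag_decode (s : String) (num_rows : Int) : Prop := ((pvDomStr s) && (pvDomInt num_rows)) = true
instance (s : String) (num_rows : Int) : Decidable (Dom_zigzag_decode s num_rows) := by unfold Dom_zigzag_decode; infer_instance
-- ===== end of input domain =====

-- B replaces A's per-row nested column loops (closed-form jump arithmetic) by a single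
-- direction-bouncing walk that buckets the original indices into rows, then hands the
-- characters of s back row by row (same return value; objective: a different, plainer decomposition).

-- ===== PORT A =====
-- inner `while col < n` loop of A (cycle > 0 is a totality guard; at every call site cycle = 2*(num_rows-1) ≥ 2)
def zzRowLoop (n cycle R row col : Nat) (ps : List Nat) : List Nat :=
  if h : col < n ∧ 0 < cycle then
    let first := col + row
    let ps1 := if first < n then ps ++ [first] else ps
    let ps2 := if row ≠ 0 ∧ row ≠ R - 1 then
        (if col + cycle - row < n then ps1 ++ [col + cycle - row] else ps1)
      else ps1
    zzRowLoop n cycle R row (col + cycle) ps2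
  else ps
termination_by n - col
decreasing_by omega

def zigzag_decode (s : String) (num_rows : Int) : String :=
  if num_rows ≤ 1 then s else
    let cs := s.toList
    let n := cs.length
    let R := num_rows.toNat
    let cycle := 2 * (R - 1)
    let result0 : List (List Char) := (List.range n).foldl (fun res _ => res ++ [[]]) []
    let positions : List Nat := (List.range R).foldl (fun ps row => zzRowLoop n cycle R row 0 ps) []
    let result := (List.range n).foldl (fun res m => res.set (positions.getD m 0) [cs.getD m ' ']) result0
    let out : List Char := (List.range n).foldl (fun o p => o ++ result.getD p []) []
    String.mk out

-- ===== PORT B =====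
def zigzag_decode_alt (s : String) (num_rows : Int) : String :=
  if num_rows ≤ 1 then s else
    let cs := s.toList
    let n := cs.length
    -- bounce walk: bucket original indices 0..n-1 into rows
    let st := (List.range n).foldl
        (fun (st : List (List Nat) × Int × Int) i =>
          let rows := st.1.set st.2.1.toNat (st.1.getD st.2.1.toNat [] ++ [i])
          let step : Int := if st.2.1 = 0 then 1 else if st.2.1 = num_rows - 1 then -1 else st.2.2
          (rows, st.2.1 + step, step))
        (List.replicate (min num_rows.toNat n) [], 0, 1)
    -- s is the rows concatenated: hand its chars back row by row
    let q := st.1.foldl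
        (fun (q : List (List Char) × Nat) row =>
          row.foldl (fun q i => (q.1.set i [cs.getD q.2 ' '], q.2 + 1)) q)
        (List.replicate n [], 0)
    String.mk q.1.flatten

-- ===== PRECONDITION & SPEC =====
def Spec_zigzag_decode (s : String) (num_rows : Int) (out : String) : Prop := out = zigzag_decode_alt s num_rows
instance (s : String) (num_rows : Int) (out : String) : Decidable (Spec_zigzag_decode s num_rows out) := by unfold Spec_zigzag_decode; infer_instance

-- ===== CLAIM (what is proved, stated in full; the proofs are below) =====
def Claim_equal_zigzag_decode : Prop := ∀ (s : String) (num_rows : Int), Dom_zigzag_decode s num_rows → Spec_zigzag_decode s num_rows (zigzag_decode s num_rows)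

-- ===== LEMMAS AND PROOFS =====

-- the row an original index i lands in, and the walking direction after visiting i
def zzFRow (R i : Nat) : Nat :=
  if i % (2*(R-1)) ≤ R - 1 then i % (2*(R-1)) else 2*(R-1) - i % (2*(R-1))

def zzPDir (R i : Nat) : Int := if i % (2*(R-1)) ≤ R - 2 then 1 else -1

def zzSDir (R : Nat) : Nat → Int
  | 0 => 1
  | i+1 => zzPDir R i

def zzCanonRow (R n r : Nat) : List Nat := (List.range n).filter (fun x => zzFRow R x == r)

theorem zzmod_succ (c i : Nat) (hc : 2 ≤ c) :
    (i+1) % c = if i % c + 1 < c then i % c + 1 else 0 := by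
  have h1 : i % c < c := Nat.mod_lt _ (by omega)
  have h2 : (i+1) % c = (i % c + 1) % c := by
    conv_lhs => rw [Nat.add_mod]
    rw [Nat.mod_eq_of_lt (show 1 < c by omega)]
  rw [h2]
  by_cases h : i % c + 1 < c
  · rw [if_pos h, Nat.mod_eq_of_lt h]
  · have he : i % c + 1 = c := by omega
    rw [if_neg h, he, Nat.mod_self]

theorem zzfrow_le_mod (R i : Nat) : zzFRow R i ≤ i % (2*(R-1)) := by
  unfold zzFRow; split <;> omega

theorem zzfrow_le_sub (R i : Nat) (h2 : 2 ≤ R) : zzFRow R i ≤ R - 1 := by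
  have h := Nat.mod_lt i (show 0 < 2*(R-1) by omega)
  unfold zzFRow; split <;> omega

theorem zzfrow_zero (R : Nat) (h2 : 2 ≤ R) : zzFRow R 0 = 0 := by
  simp [zzFRow]

theorem zzstep_eq (R : Nat) (h2 : 2 ≤ R) (i : Nat) :
    (if zzFRow R i = 0 then (1:Int) else if zzFRow R i = R - 1 then -1 else zzSDir R i)
      = zzPDir R i := by
  cases i with
  | zero =>
    unfold zzFRow zzPDir zzSDir
    simp only [Nat.zero_mod]
    split_ifs <;> omega
  | succ k =>
    have hz : zzSDir R (k+1) = zzPDir R k := rfl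
    rw [hz]
    have hk : k % (2*(R-1)) < 2*(R-1) := Nat.mod_lt _ (by omega)
    have hsucc := zzmod_succ (2*(R-1)) k (by omega)
    unfold zzFRow zzPDir
    rw [hsucc]
    split_ifs <;> omega

theorem zzrow_advance (R : Nat) (h2 : 2 ≤ R) (i : Nat) :
    (zzFRow R i : Int) + zzPDir R i = (zzFRow R (i+1) : Int) := by
  have hi : i % (2*(R-1)) < 2*(R-1) := Nat.mod_lt _ (by omega)
  have hsucc := zzmod_succ (2*(R-1)) i (by omega)
  unfold zzFRow zzPDir
  rw [hsucc]
  split_ifs <;> omega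

-- ===== B-loop invariant =====
theorem zzBloop (num_rows : Int) (h2 : (2:Int) ≤ num_rows) (n : Nat) :
    ∀ i, i ≤ n →
    (List.range i).foldl
      (fun (st : List (List Nat) × Int × Int) x =>
        (st.1.set st.2.1.toNat (st.1.getD st.2.1.toNat [] ++ [x]),
         st.2.1 + (if st.2.1 = 0 then 1 else if st.2.1 = num_rows - 1 then -1 else st.2.2),
         (if st.2.1 = 0 then (1:Int) else if st.2.1 = num_rows - 1 then -1 else st.2.2)))
      (List.replicate (min num_rows.toNat n) [], 0, 1)
    = ((List.range (min num_rows.toNat n)).map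
         (fun r => (List.range i).filter (fun x => zzFRow num_rows.toNat x == r)),
       ((zzFRow num_rows.toNat i : Nat) : Int),
       zzSDir num_rows.toNat i) := by
  intro i hin
  induction i with
  | zero =>
    have h0 : zzFRow num_rows.toNat 0 = 0 := zzfrow_zero _ (by omega)
    simp [h0, zzSDir, List.map_const']
  | succ i ih =>
    have hi : i ≤ n := by omega
    rw [List.range_succ, List.foldl_append, ih hi, List.foldl_cons, List.foldl_nil]
    have hR2 : 2 ≤ num_rows.toNat := by omega
    have hkR : zzFRow num_rows.toNat i ≤ num_rows.toNat - 1 := zzfrow_le_sub _ _ hR2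
    have hkn : zzFRow num_rows.toNat i < n := by
      have h1 := zzfrow_le_mod num_rows.toNat i
      have h2 := Nat.mod_le i (2*(num_rows.toNat-1))
      omega
    have hkrn : zzFRow num_rows.toNat i < min num_rows.toNat n := by omega
    have hcond0 : (((zzFRow num_rows.toNat i : Nat) : Int) = 0) ↔ (zzFRow num_rows.toNat i = 0) := by omega
    have hcond1 : (((zzFRow num_rows.toNat i : Nat) : Int) = num_rows - 1) ↔ (zzFRow num_rows.toNat i = num_rows.toNat - 1) := by omega
    simp only [Prod.mk.injEq, Int.toNat_natCast, hcond0, hcond1, zzstep_eq _ hR2 i]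
    refine ⟨?_, ?_, ?_⟩
    · -- rows component
      have hget : ((List.range (min num_rows.toNat n)).map
            (fun r => (List.range i).filter (fun x => zzFRow num_rows.toNat x == r))).getD
            (zzFRow num_rows.toNat i) []
          = (List.range i).filter (fun x => zzFRow num_rows.toNat x == zzFRow num_rows.toNat i) := by
        rw [List.getD_eq_getElem?_getD, List.getElem?_map, List.getElem?_range hkrn]
        rfl
      rw [hget]
      apply List.ext_getElem
      · simp
      · intro j hj1 hj2
        simp only [List.length_set, List.length_map, List.length_range] at hj1
        rw [List.getElem_set, List.getElem_map, List.getElem_range]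
        rw [List.getElem_map, List.getElem_range]
        rw [List.filter_append]
        by_cases hj : zzFRow num_rows.toNat i = j
        · rw [if_pos hj]
          subst hj
          simp [List.filter_cons]
        · rw [if_neg hj]
          have hone : List.filter (fun x => zzFRow num_rows.toNat x == j) [i] = [] := by
            simp [List.filter_cons, hj]
          rw [hone, List.append_nil]
    · -- row index component
      exact zzrow_advance _ hR2 i
    · -- step component
      simp [zzSDir]

-- ===== filter helper lemmas =====
theorem zzfilter_single (a : Nat) : ∀ len,
    (List.range len).filter (fun j => j == a) = if a < len then [a] else [] := by
  intro len
  induction len with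
  | zero => simp
  | succ len ih =>
    have hcl : List.filter (fun j => j == a) [len] = if len = a then [len] else [] := by
      by_cases h : len = a <;> simp [h]
    rw [List.range_succ, List.filter_append, ih, hcl]
    by_cases h1 : len = a
    · subst h1
      simp [Nat.lt_irrefl, Nat.lt_succ_self]
    · rw [if_neg h1, List.append_nil]
      by_cases h2 : a < len
      · rw [if_pos h2, if_pos (by omega)]
      · rw [if_neg h2, if_neg (by omega)]

theorem zzfilter_pair (a b : Nat) (hab : a < b) : ∀ len,
    (List.range len).filter (fun j => j == a || j == b)
      = (if a < len then [a] else []) ++ (if b < len then [b] else []) := by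
  intro len
  induction len with
  | zero => simp
  | succ len ih =>
    have hcl : List.filter (fun j => j == a || j == b) [len]
        = if len = a ∨ len = b then [len] else [] := by
      by_cases ha : len = a
      · simp [ha]
      · by_cases hb : len = b <;> simp [ha, hb]
    rw [List.range_succ, List.filter_append, ih, hcl]
    by_cases ha : len = a
    · rw [if_pos (Or.inl ha), if_neg (by omega), if_neg (by omega), if_pos (by omega),
        if_neg (by omega)]
      simp [ha]
    · by_cases hb : len = b
      · rw [if_pos (Or.inr hb), if_pos (by omega), if_neg (by omega), if_pos (by omega),
          if_pos (by omega)]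
        simp [hb]
      · rw [if_neg (show ¬(len = a ∨ len = b) from by tauto), List.append_nil]
        by_cases h1 : a < len
        · rw [if_pos h1, if_pos (show a < len + 1 from by omega)]
          by_cases h2 : b < len
          · rw [if_pos h2, if_pos (show b < len + 1 from by omega)]
          · rw [if_neg h2, if_neg (show ¬ b < len + 1 from by omega)]
        · rw [if_neg h1, if_neg (show ¬ a < len + 1 from by omega)]
          by_cases h2 : b < len
          · omega
          · rw [if_neg h2, if_neg (show ¬ b < len + 1 from by omega)]

-- one cycle-block of A's inner loop, as a filter over a contiguous range
theorem zzblock (R : Nat) (h2 : 2 ≤ R) (row : Nat) (hrow : row < R) (col len : Nat)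
    (hcol : col % (2*(R-1)) = 0) (hlen : len ≤ 2*(R-1)) :
    (List.range' col len).filter (fun i => zzFRow R i == row) =
      (if col + row < col + len then [col + row] else []) ++
      (if row ≠ 0 ∧ row ≠ R - 1 then
         (if col + 2*(R-1) - row < col + len then [col + 2*(R-1) - row] else []) else []) := by
  have hmod : ∀ j, j < len → (col + j) % (2*(R-1)) = j := by
    intro j hj
    have hj' : j % (2*(R-1)) = j := Nat.mod_eq_of_lt (by omega)
    rw [Nat.add_mod, hcol, Nat.zero_add, hj', hj']
  have hzz : ∀ j, j < len → zzFRow R (col + j) = if j ≤ R - 1 then j else 2*(R-1) - j := by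
    intro j hj
    unfold zzFRow
    rw [hmod j hj]
  rw [List.range'_eq_map_range, List.filter_map]
  by_cases hmid : row ≠ 0 ∧ row ≠ R - 1
  · obtain ⟨hm0, hm1⟩ := hmid
    rw [if_pos (show row ≠ 0 ∧ row ≠ R - 1 from ⟨hm0, hm1⟩)]
    rw [show col + 2*(R-1) - row = col + (2*(R-1) - row) from by omega]
    have hcong : ∀ j ∈ List.range len,
        ((fun i => zzFRow R i == row) ∘ (fun x => col + x)) j
          = (j == row || j == (2*(R-1) - row)) := by
      intro j hj
      have hj' : j < len := List.mem_range.1 hj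
      have hiff : zzFRow R (col + j) = row ↔ (j = row ∨ j = 2*(R-1) - row) := by
        rw [hzz j hj']
        split_ifs with hle <;> omega
      simp only [Function.comp_apply]
      rw [Bool.eq_iff_iff]
      simp only [beq_iff_eq, Bool.or_eq_true]
      exact hiff
    rw [List.filter_congr hcong]
    rw [zzfilter_pair row (2*(R-1) - row) (by omega) len]
    rw [List.map_append, apply_ite (List.map (fun x => col + x)),
      apply_ite (List.map (fun x => col + x))]
    simp only [List.map_cons, List.map_nil]
    simp only [show (row < len) ↔ (col + row < col + len) from by omega,
      show ((2*(R-1) - row) < len) ↔ (col + (2*(R-1) - row) < col + len) from by omega]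
  · rw [if_neg hmid, List.append_nil]
    have hor : row = 0 ∨ row = R - 1 := by tauto
    have hcong : ∀ j ∈ List.range len,
        ((fun i => zzFRow R i == row) ∘ (fun x => col + x)) j = (j == row) := by
      intro j hj
      have hj' : j < len := List.mem_range.1 hj
      have hiff : zzFRow R (col + j) = row ↔ j = row := by
        rw [hzz j hj']
        rcases hor with h | h <;> subst h <;> split_ifs with hle <;> omega
      simp only [Function.comp_apply]
      rw [Bool.eq_iff_iff]
      simp only [beq_iff_eq]
      exact hiff
    rw [List.filter_congr hcong]
    rw [zzfilter_single row len]
    rw [apply_ite (List.map (fun x => col + x))]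
    simp only [List.map_cons, List.map_nil]
    simp only [show (row < len) ↔ (col + row < col + len) from by omega]

theorem zzRowLoop_eq (R : Nat) (h2 : 2 ≤ R) (row : Nat) (hrow : row < R) (n : Nat) :
    ∀ col ps, col % (2*(R-1)) = 0 →
      zzRowLoop n (2*(R-1)) R row col ps
        = ps ++ (List.range' col (n - col)).filter (fun i => zzFRow R i == row) := by
  have key : ∀ fuel col ps, n - col ≤ fuel → col % (2*(R-1)) = 0 →
      zzRowLoop n (2*(R-1)) R row col ps
        = ps ++ (List.range' col (n - col)).filter (fun i => zzFRow R i == row) := by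
    intro fuel
    induction fuel with
    | zero =>
      intro col ps hf hc
      rw [zzRowLoop, dif_neg (by omega)]
      rw [show n - col = 0 from by omega]
      simp
    | succ fuel ih =>
      intro col ps hf hc
      by_cases hcol : col < n
      · rw [zzRowLoop, dif_pos ⟨hcol, by omega⟩]
        show zzRowLoop n (2*(R-1)) R row (col + 2*(R-1))
            (if row ≠ 0 ∧ row ≠ R - 1 then
               (if col + 2*(R-1) - row < n then
                  (if col + row < n then ps ++ [col + row] else ps) ++ [col + 2*(R-1) - row]
                else (if col + row < n then ps ++ [col + row] else ps))
             else (if col + row < n then ps ++ [col + row] else ps)) = _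
        rw [ih (col + 2*(R-1)) _ (by omega) (by rw [Nat.add_mod_right]; exact hc)]
        have hsplit : List.range' col (n - col)
            = List.range' col (min (2*(R-1)) (n - col))
              ++ List.range' (col + min (2*(R-1)) (n - col)) (n - col - min (2*(R-1)) (n - col)) := by
          have h := List.range'_append (s := col) (m := min (2*(R-1)) (n - col))
            (n := n - col - min (2*(R-1)) (n - col)) (step := 1)
          rw [Nat.one_mul] at h
          rw [show min (2*(R-1)) (n - col) + (n - col - min (2*(R-1)) (n - col)) = n - col
            from by omega] at h
          exact h.symm
        rw [hsplit, List.filter_append,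
          zzblock R h2 row hrow col (min (2*(R-1)) (n - col)) hc (by omega)]
        have hbig :
            (if row ≠ 0 ∧ row ≠ R - 1 then
               (if col + 2*(R-1) - row < n then
                  (if col + row < n then ps ++ [col + row] else ps) ++ [col + 2*(R-1) - row]
                else (if col + row < n then ps ++ [col + row] else ps))
             else (if col + row < n then ps ++ [col + row] else ps))
            = ps ++ ((if col + row < col + min (2*(R-1)) (n - col) then [col + row] else []) ++
                (if row ≠ 0 ∧ row ≠ R - 1 then
                   (if col + 2*(R-1) - row < col + min (2*(R-1)) (n - col)
                    then [col + 2*(R-1) - row] else []) else [])) := by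
          have hrc : row < 2*(R-1) := by omega
          split_ifs <;> first | omega | (simp [List.append_assoc]) | (simp [List.append_assoc]; omega)
        rw [hbig]
        by_cases hcase : 2*(R-1) ≤ n - col
        · rw [show min (2*(R-1)) (n - col) = 2*(R-1) from by omega] at *
          rw [show n - col - 2*(R-1) = n - (col + 2*(R-1)) from by omega]
          simp [List.append_assoc]
        · rw [show min (2*(R-1)) (n - col) = n - col from by omega] at *
          rw [show n - col - (n - col) = 0 from by omega,
            show n - (col + 2*(R-1)) = 0 from by omega]
          simp [List.append_assoc]
      · rw [zzRowLoop, dif_neg (by omega)]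
        rw [show n - col = 0 from by omega]
        simp
  intro col ps hc
  exact key (n - col) col ps le_rfl hc

-- generic loop-shape lemmas
theorem zzfoldl_append_of (f : Nat → List Nat) (F : List Nat → Nat → List Nat) :
    ∀ (l : List Nat), (∀ ps r, r ∈ l → F ps r = ps ++ f r) →
      ∀ acc, l.foldl F acc = acc ++ (l.map f).flatten := by
  intro l
  induction l with
  | nil => intro _ acc; simp
  | cons x xs ih =>
    intro h acc
    rw [List.foldl_cons, h acc x (List.mem_cons_self), List.map_cons, List.flatten_cons,
      ← List.append_assoc]
    exact ih (fun ps r hr => h ps r (List.mem_cons_of_mem _ hr)) _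

theorem zzfoldl_const_append (v : List Char) :
    ∀ (l : List Nat) (acc : List (List Char)),
      l.foldl (fun res _ => res ++ [v]) acc = acc ++ List.replicate l.length v := by
  intro l
  induction l with
  | nil => intro acc; simp
  | cons x xs ih =>
    intro acc
    rw [List.foldl_cons, ih, List.length_cons, List.append_assoc, List.singleton_append,
      ← List.replicate_succ]

theorem zzCounterFold (cs : List Char) :
    ∀ (l : List Nat) (init : List (List Char)) (k : Nat),
      l.foldl (fun q i => (q.1.set i [cs.getD q.2 ' '], q.2 + 1)) (init, k)
      = ((List.range l.length).foldl
           (fun res m => res.set (l.getD m 0) [cs.getD (k + m) ' ']) init,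
         k + l.length) := by
  intro l
  induction l with
  | nil => intro init k; simp
  | cons x xs ih =>
    intro init k
    rw [List.foldl_cons, ih, List.length_cons]
    simp only [Prod.mk.injEq]
    constructor
    · rw [List.range_succ_eq_map, List.foldl_cons, List.foldl_map]
      simp only [List.getD_cons_zero, List.getD_cons_succ, Nat.add_zero]
      have hfun : (fun (res : List (List Char)) (m : Nat) =>
            res.set (xs.getD m 0) [cs.getD (k + (m + 1)) ' '])
          = (fun res m => res.set (xs.getD m 0) [cs.getD (k + 1 + m) ' ']) := by
        funext res m
        rw [show k + (m + 1) = k + 1 + m from by omega]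
      rw [← hfun]
    · omega

theorem zzSetFoldLen (pos : List Nat) (cs : List Char) :
    ∀ (ms : List Nat) (res : List (List Char)),
      (ms.foldl (fun res m => res.set (pos.getD m 0) [cs.getD m ' ']) res).length = res.length := by
  intro ms
  induction ms with
  | nil => intro res; simp
  | cons x xs ih => intro res; rw [List.foldl_cons, ih, List.length_set]

theorem zzFoldGetD :
    ∀ (l : List (List Char)) (acc : List Char),
      (List.range l.length).foldl (fun o p => o ++ l.getD p []) acc = acc ++ l.flatten := by
  intro l
  induction l with
  | nil => intro acc; simp
  | cons x xs ih =>
    intro acc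
    rw [List.length_cons, List.range_succ_eq_map, List.foldl_cons, List.foldl_map]
    simp only [List.getD_cons_zero, List.getD_cons_succ]
    rw [ih (acc ++ x)]
    simp [List.append_assoc]

-- A's positions list is the rows-concatenation of the canonical row lists
theorem zzPositionsA (R : Nat) (h2 : 2 ≤ R) (n : Nat) :
    (List.range R).foldl (fun ps row => zzRowLoop n (2*(R-1)) R row 0 ps) []
      = ((List.range R).map (fun r => (List.range n).filter (fun x => zzFRow R x == r))).flatten := by
  have h := zzfoldl_append_of (fun r => (List.range n).filter (fun x => zzFRow R x == r))
    (fun ps row => zzRowLoop n (2*(R-1)) R row 0 ps) (List.range R) ?_ []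
  · simpa using h
  · intro ps r hr
    show zzRowLoop n (2*(R-1)) R r 0 ps = ps ++ (List.range n).filter (fun x => zzFRow R x == r)
    rw [zzRowLoop_eq R h2 r (List.mem_range.1 hr) n 0 ps (Nat.zero_mod _)]
    rw [Nat.sub_zero, ← List.range_eq_range']

theorem zzTrim (R : Nat) (h2 : 2 ≤ R) (n : Nat) :
    ((List.range R).map (fun r => (List.range n).filter (fun x => zzFRow R x == r))).flatten
      = ((List.range (min R n)).map
          (fun r => (List.range n).filter (fun x => zzFRow R x == r))).flatten := by
  by_cases hRn : R ≤ n
  · rw [Nat.min_eq_left hRn]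
  · rw [Nat.min_eq_right (by omega)]
    have hsplit : List.range R = List.range n ++ List.map (fun x => n + x) (List.range (R - n)) := by
      conv_lhs => rw [show R = n + (R - n) from by omega]
      exact List.range_add
    have hnil : ((List.map (fun x => n + x) (List.range (R - n))).map
        (fun r => (List.range n).filter (fun x => zzFRow R x == r))).flatten = [] := by
      rw [List.flatten_eq_nil_iff]
      intro l hl
      simp only [List.mem_map, List.mem_range] at hl
      obtain ⟨r, ⟨x, hx, rfl⟩, rfl⟩ := hl
      rw [List.filter_eq_nil_iff]
      intro a ha
      have ha' : a < n := List.mem_range.1 ha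
      have h1 := zzfrow_le_mod R a
      have h3 := Nat.mod_le a (2*(R-1))
      simp only [beq_iff_eq]
      omega
    rw [hsplit, List.map_append, List.flatten_append, hnil, List.append_nil]

theorem zzLen (R : Nat) (h2 : 2 ≤ R) (n : Nat) :
    (((List.range R).map (fun r => (List.range n).filter (fun x => zzFRow R x == r))).flatten).length
      = n := by
  have hnd : (((List.range R).map
      (fun r => (List.range n).filter (fun x => zzFRow R x == r))).flatten).Nodup := by
    rw [List.nodup_flatten]
    constructor
    · intro l hl
      simp only [List.mem_map] at hl
      obtain ⟨r, _, rfl⟩ := hl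
      exact List.Nodup.filter _ (List.nodup_range)
    · rw [List.pairwise_map]
      refine List.Pairwise.imp ?_ (List.pairwise_lt_range)
      intro a b hab x hx hx'
      simp only [List.mem_filter, List.mem_range, beq_iff_eq] at hx hx'
      omega
  have hperm : (((List.range R).map
      (fun r => (List.range n).filter (fun x => zzFRow R x == r))).flatten).Perm (List.range n) := by
    rw [List.perm_ext_iff_of_nodup hnd (List.nodup_range)]
    intro a
    simp only [List.mem_flatten, List.mem_map, List.mem_range]
    constructor
    · rintro ⟨l, ⟨r, hr, rfl⟩, ha⟩
      exact List.mem_range.1 (List.mem_filter.1 ha).1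
    · intro ha
      refine ⟨_, ⟨zzFRow R a, by have := zzfrow_le_sub R a h2; omega, rfl⟩, ?_⟩
      exact List.mem_filter.2 ⟨List.mem_range.2 ha, by simp⟩
  have hl := hperm.length_eq
  simpa using hl

-- the two branch bodies agree
theorem zz_main (cs : List Char) (num_rows : Int) (h2 : (2:Int) ≤ num_rows) :
    (List.range cs.length).foldl
      (fun o p => o ++
        ((List.range cs.length).foldl
          (fun res m => res.set
            (((List.range num_rows.toNat).foldl
                (fun ps row => zzRowLoop cs.length (2*(num_rows.toNat-1)) num_rows.toNat row 0 ps) []).getD m 0)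
            [cs.getD m ' '])
          ((List.range cs.length).foldl (fun res _ => res ++ [[]]) [])).getD p [])
      []
    =
    (((List.range cs.length).foldl
        (fun (st : List (List Nat) × Int × Int) x =>
          (st.1.set st.2.1.toNat (st.1.getD st.2.1.toNat [] ++ [x]),
           st.2.1 + (if st.2.1 = 0 then 1 else if st.2.1 = num_rows - 1 then -1 else st.2.2),
           (if st.2.1 = 0 then (1:Int) else if st.2.1 = num_rows - 1 then -1 else st.2.2)))
        (List.replicate (min num_rows.toNat cs.length) [], 0, 1)).1.foldl
      (fun (q : List (List Char) × Nat) row =>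
        row.foldl (fun q i => (q.1.set i [cs.getD q.2 ' '], q.2 + 1)) q)
      (List.replicate cs.length [], 0)).1.flatten := by
  have hR2 : 2 ≤ num_rows.toNat := by omega
  rw [zzPositionsA num_rows.toNat hR2 cs.length,
    zzTrim num_rows.toNat hR2 cs.length,
    zzBloop num_rows h2 cs.length cs.length le_rfl,
    zzfoldl_const_append [] (List.range cs.length) []]
  simp only [List.nil_append, List.length_range]
  try dsimp only
  rw [← List.foldl_flatten]
  rw [zzCounterFold cs
    (((List.range (min num_rows.toNat cs.length)).map
        (fun r => (List.range cs.length).filter (fun x => zzFRow num_rows.toNat x == r))).flatten)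
    (List.replicate cs.length []) 0]
  have hlen : (((List.range (min num_rows.toNat cs.length)).map
      (fun r => (List.range cs.length).filter (fun x => zzFRow num_rows.toNat x == r))).flatten).length
      = cs.length := by
    rw [← zzTrim num_rows.toNat hR2 cs.length]
    exact zzLen num_rows.toNat hR2 cs.length
  try dsimp only
  rw [hlen]
  simp only [Nat.zero_add]
  set FLAT := ((List.range (min num_rows.toNat cs.length)).map
      (fun r => (List.range cs.length).filter (fun x => zzFRow num_rows.toNat x == r))).flatten
    with hFLAT
  set RES := (List.range cs.length).foldl
      (fun res m => res.set (FLAT.getD m 0) [cs.getD m ' ']) (List.replicate cs.length [])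
    with hRES
  have hreslen : RES.length = cs.length := by
    rw [hRES, zzSetFoldLen FLAT cs, List.length_replicate]
  rw [show List.range cs.length = List.range RES.length from by rw [hreslen]]
  rw [zzFoldGetD RES [], List.nil_append]

-- ===== VERDICT (by name: the statement is the Claim_ definition above) =====
theorem zigzag_decode_spec : Claim_equal_zigzag_decode := by
  intro s num_rows _
  show zigzag_decode s num_rows = zigzag_decode_alt s num_rows
  unfold zigzag_decode zigzag_decode_alt
  by_cases h : num_rows ≤ 1
  · rw [if_pos h, if_pos h]
  · rw [if_neg h, if_neg h]
    exact congrArg String.mk (zz_main s.toList num_rows (by omega))
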